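-- pv_equiv track=rewrite | github.com/arknave/project-euler | python/pe684.py | S_fast
-- ===== SOURCE A (Python) =====
-- MOD = int(1e9 + 7)
--
-- def s(n):
--     n9 = n // 9
--     rem = n % 9
--
--     return ((rem + 1) * pow(10, n9, MOD) % MOD - 1) % MOD
--
-- def S_fast(n):
--     ans = 0
--     while n % 9 > 0:
--         ans += s(n)
--         ans %= MOD
--         n -= 1
--
--     k = n // 9
--     # 45 * 11111... = 5 * (10^k - 1)
--     ans += (5 * (pow(10, k, MOD) - 1)) % MOD
--
--     # 9 * 1 + 9 * 11 + 9 * 111 + ...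
--     # 9 \sum_{i=1}^{k-1} (10^i - 1)
--     # 9 [[\sum_{i=1}^{k-1} 10^i] - k]
--     # (10^k - 1) - 9k
--     ans += pow(10, k, MOD) - 9 * k - 1
--     ans %= MOD
--
--     return ans
-- ===== SOURCE B (Python) =====
-- MOD = int(1e9 + 7)
--
-- def S_fast(n):
--     # Closed form: no loop. The m with m % 9 > 0 above the last multiple of 9
--     # are m = 9k+1 .. 9k+rem with s(m) = (m%9+1)*10^k - 1; sum them as an
--     # arithmetic series and reduce mod MOD once at the end.
--     k, rem = divmod(n, 9)
--     p = pow(10, k, MOD)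
--     total = 5 * (p - 1) + (p - 9 * k - 1) + p * ((rem + 1) * (rem + 2) // 2 - 1) - rem
--     return total % MOD
-- ===== Notes on version B (the rewrite author's own statement) =====
-- stated objective: simpler
-- what changed: Replaces A's while loop that peels off the n%9 top terms one s()-call at a time (plus two block terms) by a single closed-form expression: the peeled terms form an arithmetic series 10^k*((rem+1)(rem+2)/2 - 1) - rem, so B computes everything with one pow call and one final mod.
import Mathlib
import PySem

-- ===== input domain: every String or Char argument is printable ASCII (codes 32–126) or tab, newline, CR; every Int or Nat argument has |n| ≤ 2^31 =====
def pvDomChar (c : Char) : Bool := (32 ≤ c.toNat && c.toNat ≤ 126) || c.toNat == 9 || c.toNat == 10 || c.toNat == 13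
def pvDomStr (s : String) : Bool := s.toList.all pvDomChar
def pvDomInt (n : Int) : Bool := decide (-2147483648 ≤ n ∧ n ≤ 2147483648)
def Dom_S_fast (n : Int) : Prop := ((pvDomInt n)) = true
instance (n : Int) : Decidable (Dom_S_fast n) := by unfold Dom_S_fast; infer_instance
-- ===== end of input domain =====

-- B replaces A's while loop peeling the top n%9 terms by a single closed-form
-- arithmetic-series expression reduced mod MOD once (objective: simpler).


-- ===== PORT A =====
def pMOD : Int := 1000000007

-- Three-argument pow(b, e, m), m > 0.  Python's value is the unique
-- representative of b^e in [0, m); binary squaring computes exactly that value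
-- (PySem.Int.powMod forms the full power b^e, which is not evaluable for the
-- exponents ~2*10^8 this task's domain reaches, so the square-and-multiply
-- recursion below is used; each step reduces mod m, so it is value-exact).
def powModBin (b : Int) (e : Nat) (m : Int) : Int :=
  if _h : e = 0 then PySem.Int.mod 1 m
  else
    let r := powModBin b (e / 2) m
    if e % 2 = 0 then PySem.Int.mod (r * r) m
    else PySem.Int.mod (r * r * b) m
termination_by e
decreasing_by exact Nat.div_lt_self (Nat.pos_of_ne_zero _h) (by norm_num)

-- pow(b, e, MOD) with a possibly NEGATIVE e: Python computes the modular
-- inverse of b (here b = 10, coprime to the prime MOD, so it exists) and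
-- raises it to -e.  The inverse mod MOD is unique in [0, MOD), so computing
-- it from the Bezout coefficient Int.gcdA is value-exact for Python's pow.
def pyPowMod (b : Int) (e : Int) (m : Int) : Int :=
  if e < 0 then powModBin (PySem.Int.mod (Int.gcdA b m) m) (-e).toNat m
  else powModBin b e.toNat m

def s_py (n : Int) : Int :=
  let n9 := PySem.Int.floordiv n 9
  let rem := PySem.Int.mod n 9
  PySem.Int.mod (PySem.Int.mod ((rem + 1) * pyPowMod 10 n9 pMOD) pMOD - 1) pMOD

lemma S_loop_dec {n : Int} (h : PySem.Int.mod n 9 > 0) :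
    (PySem.Int.mod (n - 1) 9).toNat < (PySem.Int.mod n 9).toNat := by
  rw [PySem.Int.mod_eq_emod_of_pos (b := (9:Int)) (by norm_num) (a := n - 1),
    PySem.Int.mod_eq_emod_of_pos (b := (9:Int)) (by norm_num) (a := n)] at *
  omega

def S_loop (n : Int) (ans : Int) : Int × Int :=
  if _h : PySem.Int.mod n 9 > 0 then
    S_loop (n - 1) (PySem.Int.mod (ans + s_py n) pMOD)
  else
    (n, ans)
termination_by (PySem.Int.mod n 9).toNat
decreasing_by exact S_loop_dec _h

def S_fast (n : Int) : Int :=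
  let p := S_loop n 0
  let k := PySem.Int.floordiv p.1 9
  let ans := p.2 + PySem.Int.mod (5 * (pyPowMod 10 k pMOD - 1)) pMOD
  let ans := PySem.Int.mod (ans + (pyPowMod 10 k pMOD - 9 * k - 1)) pMOD
  ans

-- ===== PORT B =====
def S_fast_alt (n : Int) : Int :=
  let k := PySem.Int.floordiv n 9
  let rem := PySem.Int.mod n 9
  let p := pyPowMod 10 k pMOD
  PySem.Int.mod
    (5 * (p - 1) + (p - 9 * k - 1) +
      p * (PySem.Int.floordiv ((rem + 1) * (rem + 2)) 2 - 1) - rem) pMOD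

-- ===== PRECONDITION & SPEC =====
def Spec_S_fast (n : Int) (out : Int) : Prop := out = S_fast_alt n
instance (n : Int) (out : Int) : Decidable (Spec_S_fast n out) := by unfold Spec_S_fast; infer_instance

-- ===== CLAIM (what is proved, stated in full; the proofs are below) =====
def Claim_equal_S_fast : Prop := ∀ (n : Int), Dom_S_fast n → Spec_S_fast n (S_fast n)

-- ===== LEMMAS AND PROOFS =====

lemma loop_step (n ans : Int) (h : PySem.Int.mod n 9 > 0) :
    S_loop n ans = S_loop (n - 1) (PySem.Int.mod (ans + s_py n) pMOD) := by
  rw [S_loop]; rw [dif_pos h]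

lemma loop_stop (n ans : Int) (h : ¬ PySem.Int.mod n 9 > 0) :
    S_loop n ans = (n, ans) := by
  rw [S_loop]; rw [dif_neg h]

theorem S_fast_eq_alt (n : Int) : S_fast n = S_fast_alt n := by
  obtain ⟨q, r, hr0, hr9, rfl⟩ : ∃ q r, 0 ≤ r ∧ r < 9 ∧ n = 9 * q + r :=
    ⟨n / 9, n % 9, by omega, by omega, by omega⟩
  interval_cases r
  · simp only [S_fast, S_fast_alt]
    rw [loop_stop (9 * q + 0) _ (by rw [PySem.Int.mod_eq_emod_of_pos (b := (9:Int)) (by norm_num)]; omega)]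
    simp only [pMOD,
      PySem.Int.mod_eq_emod_of_pos (b := (9:Int)) (by norm_num),
      PySem.Int.mod_eq_emod_of_pos (b := (1000000007:Int)) (by norm_num),
      PySem.Int.floordiv_eq_ediv_of_pos (b := (9:Int)) (by norm_num),
      PySem.Int.floordiv_eq_ediv_of_pos (b := (2:Int)) (by norm_num)]
    rw [(by omega : (9 * q + 0 : Int) / 9 = q)]
    rw [(by omega : (9 * q + 0 : Int) % 9 = 0)]
    generalize pyPowMod 10 q 1000000007 = P
    omega
  · simp only [S_fast, S_fast_alt]
    rw [loop_step (9 * q + 1) _ (by rw [PySem.Int.mod_eq_emod_of_pos (b := (9:Int)) (by norm_num)]; omega)]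
    rw [loop_stop (9 * q + 1 - 1) _ (by rw [PySem.Int.mod_eq_emod_of_pos (b := (9:Int)) (by norm_num)]; omega)]
    simp only [s_py, pMOD,
      PySem.Int.mod_eq_emod_of_pos (b := (9:Int)) (by norm_num),
      PySem.Int.mod_eq_emod_of_pos (b := (1000000007:Int)) (by norm_num),
      PySem.Int.floordiv_eq_ediv_of_pos (b := (9:Int)) (by norm_num),
      PySem.Int.floordiv_eq_ediv_of_pos (b := (2:Int)) (by norm_num)]
    rw [(by omega : (9 * q + 1 : Int) / 9 = q)]
    rw [(by omega : (9 * q + 1 : Int) % 9 = 1)]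
    rw [(by omega : (9 * q + 1 - 1 : Int) / 9 = q)]
    generalize pyPowMod 10 q 1000000007 = P
    omega
  · simp only [S_fast, S_fast_alt]
    rw [loop_step (9 * q + 2) _ (by rw [PySem.Int.mod_eq_emod_of_pos (b := (9:Int)) (by norm_num)]; omega)]
    rw [loop_step (9 * q + 2 - 1) _ (by rw [PySem.Int.mod_eq_emod_of_pos (b := (9:Int)) (by norm_num)]; omega)]
    rw [loop_stop (9 * q + 2 - 1 - 1) _ (by rw [PySem.Int.mod_eq_emod_of_pos (b := (9:Int)) (by norm_num)]; omega)]
    simp only [s_py, pMOD,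
      PySem.Int.mod_eq_emod_of_pos (b := (9:Int)) (by norm_num),
      PySem.Int.mod_eq_emod_of_pos (b := (1000000007:Int)) (by norm_num),
      PySem.Int.floordiv_eq_ediv_of_pos (b := (9:Int)) (by norm_num),
      PySem.Int.floordiv_eq_ediv_of_pos (b := (2:Int)) (by norm_num)]
    rw [(by omega : (9 * q + 2 : Int) / 9 = q)]
    rw [(by omega : (9 * q + 2 : Int) % 9 = 2)]
    rw [(by omega : (9 * q + 2 - 1 : Int) / 9 = q)]
    rw [(by omega : (9 * q + 2 - 1 : Int) % 9 = 1)]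
    rw [(by omega : (9 * q + 2 - 1 - 1 : Int) / 9 = q)]
    generalize pyPowMod 10 q 1000000007 = P
    omega
  · simp only [S_fast, S_fast_alt]
    rw [loop_step (9 * q + 3) _ (by rw [PySem.Int.mod_eq_emod_of_pos (b := (9:Int)) (by norm_num)]; omega)]
    rw [loop_step (9 * q + 3 - 1) _ (by rw [PySem.Int.mod_eq_emod_of_pos (b := (9:Int)) (by norm_num)]; omega)]
    rw [loop_step (9 * q + 3 - 1 - 1) _ (by rw [PySem.Int.mod_eq_emod_of_pos (b := (9:Int)) (by norm_num)]; omega)]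
    rw [loop_stop (9 * q + 3 - 1 - 1 - 1) _ (by rw [PySem.Int.mod_eq_emod_of_pos (b := (9:Int)) (by norm_num)]; omega)]
    simp only [s_py, pMOD,
      PySem.Int.mod_eq_emod_of_pos (b := (9:Int)) (by norm_num),
      PySem.Int.mod_eq_emod_of_pos (b := (1000000007:Int)) (by norm_num),
      PySem.Int.floordiv_eq_ediv_of_pos (b := (9:Int)) (by norm_num),
      PySem.Int.floordiv_eq_ediv_of_pos (b := (2:Int)) (by norm_num)]
    rw [(by omega : (9 * q + 3 : Int) / 9 = q)]
    rw [(by omega : (9 * q + 3 : Int) % 9 = 3)]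
    rw [(by omega : (9 * q + 3 - 1 : Int) / 9 = q)]
    rw [(by omega : (9 * q + 3 - 1 : Int) % 9 = 2)]
    rw [(by omega : (9 * q + 3 - 1 - 1 : Int) / 9 = q)]
    rw [(by omega : (9 * q + 3 - 1 - 1 : Int) % 9 = 1)]
    rw [(by omega : (9 * q + 3 - 1 - 1 - 1 : Int) / 9 = q)]
    generalize pyPowMod 10 q 1000000007 = P
    omega
  · simp only [S_fast, S_fast_alt]
    rw [loop_step (9 * q + 4) _ (by rw [PySem.Int.mod_eq_emod_of_pos (b := (9:Int)) (by norm_num)]; omega)]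
    rw [loop_step (9 * q + 4 - 1) _ (by rw [PySem.Int.mod_eq_emod_of_pos (b := (9:Int)) (by norm_num)]; omega)]
    rw [loop_step (9 * q + 4 - 1 - 1) _ (by rw [PySem.Int.mod_eq_emod_of_pos (b := (9:Int)) (by norm_num)]; omega)]
    rw [loop_step (9 * q + 4 - 1 - 1 - 1) _ (by rw [PySem.Int.mod_eq_emod_of_pos (b := (9:Int)) (by norm_num)]; omega)]
    rw [loop_stop (9 * q + 4 - 1 - 1 - 1 - 1) _ (by rw [PySem.Int.mod_eq_emod_of_pos (b := (9:Int)) (by norm_num)]; omega)]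
    simp only [s_py, pMOD,
      PySem.Int.mod_eq_emod_of_pos (b := (9:Int)) (by norm_num),
      PySem.Int.mod_eq_emod_of_pos (b := (1000000007:Int)) (by norm_num),
      PySem.Int.floordiv_eq_ediv_of_pos (b := (9:Int)) (by norm_num),
      PySem.Int.floordiv_eq_ediv_of_pos (b := (2:Int)) (by norm_num)]
    rw [(by omega : (9 * q + 4 : Int) / 9 = q)]
    rw [(by omega : (9 * q + 4 : Int) % 9 = 4)]
    rw [(by omega : (9 * q + 4 - 1 : Int) / 9 = q)]
    rw [(by omega : (9 * q + 4 - 1 : Int) % 9 = 3)]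
    rw [(by omega : (9 * q + 4 - 1 - 1 : Int) / 9 = q)]
    rw [(by omega : (9 * q + 4 - 1 - 1 : Int) % 9 = 2)]
    rw [(by omega : (9 * q + 4 - 1 - 1 - 1 : Int) / 9 = q)]
    rw [(by omega : (9 * q + 4 - 1 - 1 - 1 : Int) % 9 = 1)]
    rw [(by omega : (9 * q + 4 - 1 - 1 - 1 - 1 : Int) / 9 = q)]
    generalize pyPowMod 10 q 1000000007 = P
    omega
  · simp only [S_fast, S_fast_alt]
    rw [loop_step (9 * q + 5) _ (by rw [PySem.Int.mod_eq_emod_of_pos (b := (9:Int)) (by norm_num)]; omega)]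
    rw [loop_step (9 * q + 5 - 1) _ (by rw [PySem.Int.mod_eq_emod_of_pos (b := (9:Int)) (by norm_num)]; omega)]
    rw [loop_step (9 * q + 5 - 1 - 1) _ (by rw [PySem.Int.mod_eq_emod_of_pos (b := (9:Int)) (by norm_num)]; omega)]
    rw [loop_step (9 * q + 5 - 1 - 1 - 1) _ (by rw [PySem.Int.mod_eq_emod_of_pos (b := (9:Int)) (by norm_num)]; omega)]
    rw [loop_step (9 * q + 5 - 1 - 1 - 1 - 1) _ (by rw [PySem.Int.mod_eq_emod_of_pos (b := (9:Int)) (by norm_num)]; omega)]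
    rw [loop_stop (9 * q + 5 - 1 - 1 - 1 - 1 - 1) _ (by rw [PySem.Int.mod_eq_emod_of_pos (b := (9:Int)) (by norm_num)]; omega)]
    simp only [s_py, pMOD,
      PySem.Int.mod_eq_emod_of_pos (b := (9:Int)) (by norm_num),
      PySem.Int.mod_eq_emod_of_pos (b := (1000000007:Int)) (by norm_num),
      PySem.Int.floordiv_eq_ediv_of_pos (b := (9:Int)) (by norm_num),
      PySem.Int.floordiv_eq_ediv_of_pos (b := (2:Int)) (by norm_num)]
    rw [(by omega : (9 * q + 5 : Int) / 9 = q)]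
    rw [(by omega : (9 * q + 5 : Int) % 9 = 5)]
    rw [(by omega : (9 * q + 5 - 1 : Int) / 9 = q)]
    rw [(by omega : (9 * q + 5 - 1 : Int) % 9 = 4)]
    rw [(by omega : (9 * q + 5 - 1 - 1 : Int) / 9 = q)]
    rw [(by omega : (9 * q + 5 - 1 - 1 : Int) % 9 = 3)]
    rw [(by omega : (9 * q + 5 - 1 - 1 - 1 : Int) / 9 = q)]
    rw [(by omega : (9 * q + 5 - 1 - 1 - 1 : Int) % 9 = 2)]
    rw [(by omega : (9 * q + 5 - 1 - 1 - 1 - 1 : Int) / 9 = q)]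
    rw [(by omega : (9 * q + 5 - 1 - 1 - 1 - 1 : Int) % 9 = 1)]
    rw [(by omega : (9 * q + 5 - 1 - 1 - 1 - 1 - 1 : Int) / 9 = q)]
    generalize pyPowMod 10 q 1000000007 = P
    omega
  · simp only [S_fast, S_fast_alt]
    rw [loop_step (9 * q + 6) _ (by rw [PySem.Int.mod_eq_emod_of_pos (b := (9:Int)) (by norm_num)]; omega)]
    rw [loop_step (9 * q + 6 - 1) _ (by rw [PySem.Int.mod_eq_emod_of_pos (b := (9:Int)) (by norm_num)]; omega)]
    rw [loop_step (9 * q + 6 - 1 - 1) _ (by rw [PySem.Int.mod_eq_emod_of_pos (b := (9:Int)) (by norm_num)]; omega)]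
    rw [loop_step (9 * q + 6 - 1 - 1 - 1) _ (by rw [PySem.Int.mod_eq_emod_of_pos (b := (9:Int)) (by norm_num)]; omega)]
    rw [loop_step (9 * q + 6 - 1 - 1 - 1 - 1) _ (by rw [PySem.Int.mod_eq_emod_of_pos (b := (9:Int)) (by norm_num)]; omega)]
    rw [loop_step (9 * q + 6 - 1 - 1 - 1 - 1 - 1) _ (by rw [PySem.Int.mod_eq_emod_of_pos (b := (9:Int)) (by norm_num)]; omega)]
    rw [loop_stop (9 * q + 6 - 1 - 1 - 1 - 1 - 1 - 1) _ (by rw [PySem.Int.mod_eq_emod_of_pos (b := (9:Int)) (by norm_num)]; omega)]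
    simp only [s_py, pMOD,
      PySem.Int.mod_eq_emod_of_pos (b := (9:Int)) (by norm_num),
      PySem.Int.mod_eq_emod_of_pos (b := (1000000007:Int)) (by norm_num),
      PySem.Int.floordiv_eq_ediv_of_pos (b := (9:Int)) (by norm_num),
      PySem.Int.floordiv_eq_ediv_of_pos (b := (2:Int)) (by norm_num)]
    rw [(by omega : (9 * q + 6 : Int) / 9 = q)]
    rw [(by omega : (9 * q + 6 : Int) % 9 = 6)]
    rw [(by omega : (9 * q + 6 - 1 : Int) / 9 = q)]
    rw [(by omega : (9 * q + 6 - 1 : Int) % 9 = 5)]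
    rw [(by omega : (9 * q + 6 - 1 - 1 : Int) / 9 = q)]
    rw [(by omega : (9 * q + 6 - 1 - 1 : Int) % 9 = 4)]
    rw [(by omega : (9 * q + 6 - 1 - 1 - 1 : Int) / 9 = q)]
    rw [(by omega : (9 * q + 6 - 1 - 1 - 1 : Int) % 9 = 3)]
    rw [(by omega : (9 * q + 6 - 1 - 1 - 1 - 1 : Int) / 9 = q)]
    rw [(by omega : (9 * q + 6 - 1 - 1 - 1 - 1 : Int) % 9 = 2)]
    rw [(by omega : (9 * q + 6 - 1 - 1 - 1 - 1 - 1 : Int) / 9 = q)]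
    rw [(by omega : (9 * q + 6 - 1 - 1 - 1 - 1 - 1 : Int) % 9 = 1)]
    rw [(by omega : (9 * q + 6 - 1 - 1 - 1 - 1 - 1 - 1 : Int) / 9 = q)]
    generalize pyPowMod 10 q 1000000007 = P
    omega
  · simp only [S_fast, S_fast_alt]
    rw [loop_step (9 * q + 7) _ (by rw [PySem.Int.mod_eq_emod_of_pos (b := (9:Int)) (by norm_num)]; omega)]
    rw [loop_step (9 * q + 7 - 1) _ (by rw [PySem.Int.mod_eq_emod_of_pos (b := (9:Int)) (by norm_num)]; omega)]
    rw [loop_step (9 * q + 7 - 1 - 1) _ (by rw [PySem.Int.mod_eq_emod_of_pos (b := (9:Int)) (by norm_num)]; omega)]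
    rw [loop_step (9 * q + 7 - 1 - 1 - 1) _ (by rw [PySem.Int.mod_eq_emod_of_pos (b := (9:Int)) (by norm_num)]; omega)]
    rw [loop_step (9 * q + 7 - 1 - 1 - 1 - 1) _ (by rw [PySem.Int.mod_eq_emod_of_pos (b := (9:Int)) (by norm_num)]; omega)]
    rw [loop_step (9 * q + 7 - 1 - 1 - 1 - 1 - 1) _ (by rw [PySem.Int.mod_eq_emod_of_pos (b := (9:Int)) (by norm_num)]; omega)]
    rw [loop_step (9 * q + 7 - 1 - 1 - 1 - 1 - 1 - 1) _ (by rw [PySem.Int.mod_eq_emod_of_pos (b := (9:Int)) (by norm_num)]; omega)]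
    rw [loop_stop (9 * q + 7 - 1 - 1 - 1 - 1 - 1 - 1 - 1) _ (by rw [PySem.Int.mod_eq_emod_of_pos (b := (9:Int)) (by norm_num)]; omega)]
    simp only [s_py, pMOD,
      PySem.Int.mod_eq_emod_of_pos (b := (9:Int)) (by norm_num),
      PySem.Int.mod_eq_emod_of_pos (b := (1000000007:Int)) (by norm_num),
      PySem.Int.floordiv_eq_ediv_of_pos (b := (9:Int)) (by norm_num),
      PySem.Int.floordiv_eq_ediv_of_pos (b := (2:Int)) (by norm_num)]
    rw [(by omega : (9 * q + 7 : Int) / 9 = q)]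
    rw [(by omega : (9 * q + 7 : Int) % 9 = 7)]
    rw [(by omega : (9 * q + 7 - 1 : Int) / 9 = q)]
    rw [(by omega : (9 * q + 7 - 1 : Int) % 9 = 6)]
    rw [(by omega : (9 * q + 7 - 1 - 1 : Int) / 9 = q)]
    rw [(by omega : (9 * q + 7 - 1 - 1 : Int) % 9 = 5)]
    rw [(by omega : (9 * q + 7 - 1 - 1 - 1 : Int) / 9 = q)]
    rw [(by omega : (9 * q + 7 - 1 - 1 - 1 : Int) % 9 = 4)]
    rw [(by omega : (9 * q + 7 - 1 - 1 - 1 - 1 : Int) / 9 = q)]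
    rw [(by omega : (9 * q + 7 - 1 - 1 - 1 - 1 : Int) % 9 = 3)]
    rw [(by omega : (9 * q + 7 - 1 - 1 - 1 - 1 - 1 : Int) / 9 = q)]
    rw [(by omega : (9 * q + 7 - 1 - 1 - 1 - 1 - 1 : Int) % 9 = 2)]
    rw [(by omega : (9 * q + 7 - 1 - 1 - 1 - 1 - 1 - 1 : Int) / 9 = q)]
    rw [(by omega : (9 * q + 7 - 1 - 1 - 1 - 1 - 1 - 1 : Int) % 9 = 1)]
    rw [(by omega : (9 * q + 7 - 1 - 1 - 1 - 1 - 1 - 1 - 1 : Int) / 9 = q)]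
    generalize pyPowMod 10 q 1000000007 = P
    omega
  · simp only [S_fast, S_fast_alt]
    rw [loop_step (9 * q + 8) _ (by rw [PySem.Int.mod_eq_emod_of_pos (b := (9:Int)) (by norm_num)]; omega)]
    rw [loop_step (9 * q + 8 - 1) _ (by rw [PySem.Int.mod_eq_emod_of_pos (b := (9:Int)) (by norm_num)]; omega)]
    rw [loop_step (9 * q + 8 - 1 - 1) _ (by rw [PySem.Int.mod_eq_emod_of_pos (b := (9:Int)) (by norm_num)]; omega)]
    rw [loop_step (9 * q + 8 - 1 - 1 - 1) _ (by rw [PySem.Int.mod_eq_emod_of_pos (b := (9:Int)) (by norm_num)]; omega)]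
    rw [loop_step (9 * q + 8 - 1 - 1 - 1 - 1) _ (by rw [PySem.Int.mod_eq_emod_of_pos (b := (9:Int)) (by norm_num)]; omega)]
    rw [loop_step (9 * q + 8 - 1 - 1 - 1 - 1 - 1) _ (by rw [PySem.Int.mod_eq_emod_of_pos (b := (9:Int)) (by norm_num)]; omega)]
    rw [loop_step (9 * q + 8 - 1 - 1 - 1 - 1 - 1 - 1) _ (by rw [PySem.Int.mod_eq_emod_of_pos (b := (9:Int)) (by norm_num)]; omega)]
    rw [loop_step (9 * q + 8 - 1 - 1 - 1 - 1 - 1 - 1 - 1) _ (by rw [PySem.Int.mod_eq_emod_of_pos (b := (9:Int)) (by norm_num)]; omega)]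
    rw [loop_stop (9 * q + 8 - 1 - 1 - 1 - 1 - 1 - 1 - 1 - 1) _ (by rw [PySem.Int.mod_eq_emod_of_pos (b := (9:Int)) (by norm_num)]; omega)]
    simp only [s_py, pMOD,
      PySem.Int.mod_eq_emod_of_pos (b := (9:Int)) (by norm_num),
      PySem.Int.mod_eq_emod_of_pos (b := (1000000007:Int)) (by norm_num),
      PySem.Int.floordiv_eq_ediv_of_pos (b := (9:Int)) (by norm_num),
      PySem.Int.floordiv_eq_ediv_of_pos (b := (2:Int)) (by norm_num)]
    rw [(by omega : (9 * q + 8 : Int) / 9 = q)]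
    rw [(by omega : (9 * q + 8 : Int) % 9 = 8)]
    rw [(by omega : (9 * q + 8 - 1 : Int) / 9 = q)]
    rw [(by omega : (9 * q + 8 - 1 : Int) % 9 = 7)]
    rw [(by omega : (9 * q + 8 - 1 - 1 : Int) / 9 = q)]
    rw [(by omega : (9 * q + 8 - 1 - 1 : Int) % 9 = 6)]
    rw [(by omega : (9 * q + 8 - 1 - 1 - 1 : Int) / 9 = q)]
    rw [(by omega : (9 * q + 8 - 1 - 1 - 1 : Int) % 9 = 5)]
    rw [(by omega : (9 * q + 8 - 1 - 1 - 1 - 1 : Int) / 9 = q)]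
    rw [(by omega : (9 * q + 8 - 1 - 1 - 1 - 1 : Int) % 9 = 4)]
    rw [(by omega : (9 * q + 8 - 1 - 1 - 1 - 1 - 1 : Int) / 9 = q)]
    rw [(by omega : (9 * q + 8 - 1 - 1 - 1 - 1 - 1 : Int) % 9 = 3)]
    rw [(by omega : (9 * q + 8 - 1 - 1 - 1 - 1 - 1 - 1 : Int) / 9 = q)]
    rw [(by omega : (9 * q + 8 - 1 - 1 - 1 - 1 - 1 - 1 : Int) % 9 = 2)]
    rw [(by omega : (9 * q + 8 - 1 - 1 - 1 - 1 - 1 - 1 - 1 : Int) / 9 = q)]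
    rw [(by omega : (9 * q + 8 - 1 - 1 - 1 - 1 - 1 - 1 - 1 : Int) % 9 = 1)]
    rw [(by omega : (9 * q + 8 - 1 - 1 - 1 - 1 - 1 - 1 - 1 - 1 : Int) / 9 = q)]
    generalize pyPowMod 10 q 1000000007 = P
    omega

-- ===== VERDICT (by name: the statement is the Claim_ definition above) =====
theorem S_fast_spec : Claim_equal_S_fast := by
  intro n _
  unfold Spec_S_fast
  exact S_fast_eq_alt n
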